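-- pv_equiv track=rewrite | github.com/Guillethecoder/RouteOptimize | partision_algorithm.py | CargoPartition
-- ===== SOURCE A (Python) =====
-- def CargoPartition(array):
--     n = len(array)
--     final_list_solution = []
--
--     for partition_index in range(2 ** (n-1)):
--
--         # current partition, e.g., [['a', 'b'], ['c', 'd', 'e']]
--         partition = []
--
--         # used to accumulate the subsets, e.g., ['a', 'b']
--         subset = []
--
--         for position in range(n):
--
--             subset.append(array[position])
--
--             # check whether to "break off" a new subset
--             if 1 << position & partition_index or position == n-1:
--                 partition.append(subset)
--                 subset = []
--
--         final_list_solution.append(partition)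
--     return final_list_solution
-- ===== SOURCE B (Python) =====
-- def CargoPartition(array):
--     partitions = [[[array[0]]]]
--     for x in array[1:]:
--         partitions = ([p[:-1] + [p[-1] + [x]] for p in partitions]
--                       + [p + [[x]] for p in partitions])
--     return partitions
-- ===== Notes on version B (the rewrite author's own statement) =====
-- stated objective: alternative
-- what changed: A enumerates all 2^(n-1) break-masks and rescans the whole array once per mask with bit tests; B builds the partition list incrementally over prefixes, doubling it per element (extend-last variants first, then new-subset variants), which reproduces A's binary-counter order without any rescan or bit tests.
import Mathlib
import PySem

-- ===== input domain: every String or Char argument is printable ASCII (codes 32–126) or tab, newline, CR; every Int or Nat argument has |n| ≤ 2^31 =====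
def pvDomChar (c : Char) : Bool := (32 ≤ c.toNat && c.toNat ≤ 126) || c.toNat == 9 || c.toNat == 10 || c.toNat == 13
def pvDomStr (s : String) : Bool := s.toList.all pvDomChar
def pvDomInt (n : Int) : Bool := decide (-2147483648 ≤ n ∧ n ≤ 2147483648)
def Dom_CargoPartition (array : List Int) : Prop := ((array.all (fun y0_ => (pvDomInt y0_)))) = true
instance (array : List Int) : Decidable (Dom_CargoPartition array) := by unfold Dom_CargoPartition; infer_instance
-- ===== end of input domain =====

-- B replaces A's binary-counter enumeration (one full scan of the array per bitmask)
-- by incremental doubling over prefixes, emitting extend-variants before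
-- new-subset-variants, which reproduces A's order exactly (same exponential output).

-- ===== PORT A =====
-- Port of A. The nonnegative `range(...)` indices are ported as `List.range` over Nat;
-- the test `1 << position & partition_index` on these nonnegative ints is exactly
-- `Nat.testBit partition_index position`. For the empty array Python raises
-- TypeError (range of a negative power); that input is excluded by Pre_CargoPartition.
def CargoPartition (array : List Int) : List (List (List Int)) :=
  let n := array.length
  (List.range (2 ^ (n - 1))).foldl
    (fun final_list_solution partition_index =>
      let st := (List.range n).foldl
        (fun (st : List (List Int) × List Int) (position : Nat) =>
          let subset := st.2 ++ [PySem.List.pyGetD array ((position : Nat) : Int) 0]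
          if partition_index.testBit position || position == n - 1 then
            (st.1 ++ [subset], ([] : List Int))
          else
            (st.1, subset))
        ([], [])
      final_list_solution ++ [st.1])
    []

-- ===== PORT B =====
-- `p[:-1] + [p[-1] + [x]]` from Source B (a helper so the step can be named in lemmas)
def pvExt (x : Int) (p : List (List Int)) : List (List Int) :=
  PySem.List.slice p none (some (-1)) ++ [(PySem.List.pyGet? p (-1)).getD [] ++ [x]]

-- one iteration of Source B's loop body
def pvStep (partitions : List (List (List Int))) (x : Int) : List (List (List Int)) :=
  partitions.map (pvExt x) ++ partitions.map (fun p => p ++ [[x]])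

-- Port of B (Source B). On the empty list Python B raises IndexError; that input is
-- outside Pre_CargoPartition and this port returns the empty list there.
def CargoPartition_alt (array : List Int) : List (List (List Int)) :=
  match array with
  | [] => []
  | a0 :: _ => (PySem.List.slice array (some 1) none).foldl pvStep [[[a0]]]

-- ===== PRECONDITION & SPEC =====
-- Pre_ excludes only the empty array, on which BOTH Pythons raise (A: TypeError from
-- range of a negative power; B: IndexError from indexing the first element).
def Pre_CargoPartition (array : List Int) : Prop := array ≠ []
instance (array : List Int) : Decidable (Pre_CargoPartition array) := by unfold Pre_CargoPartition; infer_instance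
def pvWitness_CargoPartition : List Int := ([1, 2] : List Int)

def Spec_CargoPartition (array : List Int) (out : List (List (List Int))) : Prop := out = CargoPartition_alt array
instance (array : List Int) (out : List (List (List Int))) : Decidable (Spec_CargoPartition array out) := by unfold Spec_CargoPartition; infer_instance

-- ===== CLAIM (what is proved, stated in full; the proofs are below) =====
def Claim_equal_CargoPartition : Prop := ∀ (array : List Int), Dom_CargoPartition array → Pre_CargoPartition array → Spec_CargoPartition array (CargoPartition array)

-- ===== LEMMAS AND PROOFS =====

-- A's inner scan, abstracted: a list of (value, flush?) pairs folded through the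
-- (partition, subset) state.
def pvLoopA : List (Int × Bool) → List (List Int) × List Int → List (List Int) × List Int
  | [], st => st
  | (v, b) :: rest, st =>
    pvLoopA rest (if b then (st.1 ++ [st.2 ++ [v]], ([] : List Int)) else (st.1, st.2 ++ [v]))

-- the flags A's inner loop uses at absolute positions starting at k
def pvFlags (m nlast : Nat) : List Int → Nat → List (Int × Bool)
  | [], _ => []
  | v :: t, k => (v, m.testBit k || k == nlast) :: pvFlags m nlast t (k + 1)

-- flags without the forced flush at the last position
def pvBase (m : Nat) : List Int → Nat → List (Int × Bool)
  | [], _ => []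
  | v :: t, k => (v, m.testBit k) :: pvBase m t (k + 1)

def pvQ (ys : List Int) (m : Nat) : List (List Int) × List Int :=
  pvLoopA (pvBase m ys 0) ([], [])

def pvPartA (xs : List Int) (m : Nat) : List (List Int) :=
  (pvLoopA (pvFlags m (xs.length - 1) xs 0) ([], [])).1

theorem pvLoopA_append (l1 l2 : List (Int × Bool)) :
    ∀ st, pvLoopA (l1 ++ l2) st = pvLoopA l2 (pvLoopA l1 st) := by
  induction l1 with
  | nil => intro st; rfl
  | cons vb t ih => intro st; cases vb with | mk v b => simp [pvLoopA, ih]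

theorem pvFlags_concat (m : Nat) :
    ∀ (ys : List Int) (y : Int) (k : Nat),
      pvFlags m (k + ys.length) (ys ++ [y]) k = pvBase m ys k ++ [(y, true)] := by
  intro ys
  induction ys with
  | nil => intro y k; simp [pvFlags, pvBase]
  | cons v t ih =>
    intro y k
    have hne : (k == k + (t.length + 1)) = false := by simp
    simp only [List.cons_append, pvFlags, pvBase, List.length_cons]
    rw [hne, Bool.or_false, show k + (t.length + 1) = (k + 1) + t.length by omega,
      ih y (k + 1)]

theorem pvBase_concat (m : Nat) :
    ∀ (ys : List Int) (y : Int) (k : Nat),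
      pvBase m (ys ++ [y]) k = pvBase m ys k ++ [(y, m.testBit (k + ys.length))] := by
  intro ys
  induction ys with
  | nil => intro y k; simp [pvBase]
  | cons v t ih =>
    intro y k
    simp only [List.cons_append, pvBase, List.length_cons]
    rw [ih y (k + 1), show (k + 1) + t.length = k + (t.length + 1) by omega]

theorem pvBase_congr (m m' : Nat) :
    ∀ (ys : List Int) (k : Nat),
      (∀ p, p < k + ys.length → m.testBit p = m'.testBit p) →
      pvBase m ys k = pvBase m' ys k := by
  intro ys
  induction ys with
  | nil => intro k _; rfl
  | cons v t ih =>
    intro k h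
    simp only [pvBase]
    rw [h k (by simp), ih (k + 1) (fun p hp => h p (by simp only [List.length_cons]; omega))]

theorem pv_testBit_high (k m' : Nat) (h : m' < 2 ^ k) : (2 ^ k + m').testBit k = true := by
  rw [Nat.testBit_two_pow_add_eq, Nat.testBit_eq_false_of_lt h]
  rfl

theorem pvExt_concat (y : Int) (q : List (List Int)) (s : List Int) :
    pvExt y (q ++ [s]) = q ++ [s ++ [y]] := by
  simp [pvExt, PySem.List.slice_to_neg_one, PySem.List.pyGet?_neg_one_append_singleton]

theorem pvPartA_concat (ys : List Int) (y : Int) (m : Nat) :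
    pvPartA (ys ++ [y]) m = (pvQ ys m).1 ++ [(pvQ ys m).2 ++ [y]] := by
  unfold pvPartA pvQ
  have hlen : (ys ++ [y]).length - 1 = 0 + ys.length := by simp
  rw [hlen, pvFlags_concat m ys y 0, pvLoopA_append]
  simp [pvLoopA]

theorem pvQ_concat_true (ys : List Int) (y : Int) (m : Nat)
    (h : m.testBit ys.length = true) :
    pvQ (ys ++ [y]) m = ((pvQ ys m).1 ++ [(pvQ ys m).2 ++ [y]], ([] : List Int)) := by
  unfold pvQ
  rw [pvBase_concat m ys y 0, pvLoopA_append]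
  simp [pvLoopA, h]

theorem pvQ_concat_false (ys : List Int) (y : Int) (m : Nat)
    (h : m.testBit ys.length = false) :
    pvQ (ys ++ [y]) m = ((pvQ ys m).1, (pvQ ys m).2 ++ [y]) := by
  unfold pvQ
  rw [pvBase_concat m ys y 0, pvLoopA_append]
  simp [pvLoopA, h]

theorem pvQ_congr (ys : List Int) (m m' : Nat)
    (h : ∀ p, p < ys.length → m.testBit p = m'.testBit p) : pvQ ys m = pvQ ys m' := by
  unfold pvQ
  rw [pvBase_congr m m' ys 0 (fun p hp => h p (by omega))]

-- first half of the doubling step: extend the last subset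
theorem pv_step_lo (q : List Int) (z y : Int) (m : Nat) (h : m < 2 ^ q.length) :
    pvPartA ((q ++ [z]) ++ [y]) m = pvExt y (pvPartA (q ++ [z]) m) := by
  rw [pvPartA_concat (q ++ [z]) y m,
      pvQ_concat_false q z m (Nat.testBit_eq_false_of_lt h),
      pvPartA_concat q z m, pvExt_concat]

-- second half of the doubling step: start a new subset
theorem pv_step_hi (q : List Int) (z y : Int) (m' : Nat) (h : m' < 2 ^ q.length) :
    pvPartA ((q ++ [z]) ++ [y]) (2 ^ q.length + m') = pvPartA (q ++ [z]) m' ++ [[y]] := by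
  rw [pvPartA_concat (q ++ [z]) y _,
      pvQ_concat_true q z _ (pv_testBit_high q.length m' h),
      pvQ_congr q _ m' (fun p hp => Nat.testBit_two_pow_add_gt hp m'),
      pvPartA_concat q z m']
  simp

-- the generic "append-accumulating fold is a map"
theorem pv_foldl_snoc_map {α β : Type} (g : α → β) :
    ∀ (L : List α) (init : List β),
      L.foldl (fun acc m => acc ++ [g m]) init = init ++ L.map g := by
  intro L
  induction L with
  | nil => intro init; simp
  | cons a t ih => intro init; simp [ih]

-- bridge: A's inner index loop is pvLoopA on the flagged suffix
theorem pv_inner_bridge (array : List Int) (m : Nat) :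
    ∀ (ys : List Int) (k : Nat) (st : List (List Int) × List Int),
      ys = array.drop k →
      (List.range' k ys.length).foldl
        (fun (st : List (List Int) × List Int) (position : Nat) =>
          if m.testBit position || position == array.length - 1 then
            (st.1 ++ [st.2 ++ [PySem.List.pyGetD array ((position : Nat) : Int) 0]],
              ([] : List Int))
          else
            (st.1, st.2 ++ [PySem.List.pyGetD array ((position : Nat) : Int) 0]))
        st
      = pvLoopA (pvFlags m (array.length - 1) ys k) st := by
  intro ys
  induction ys with
  | nil => intro k st _; rfl
  | cons v t ih =>
    intro k st h
    have hk : k < array.length := by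
      by_contra hk
      have hnil : array.drop k = [] := List.drop_eq_nil_of_le (by omega)
      rw [hnil] at h
      simp at h
    have hv : array[k]? = some v := by
      have h0 := congrArg (fun l => l[0]?) h
      simpa [List.getElem?_drop] using h0.symm
    have hget : PySem.List.pyGetD array ((k : Nat) : Int) 0 = v := by
      rw [PySem.List.pyGetD_of_nonneg _ _ (by positivity)]
      simp only [Int.toNat_natCast]
      rw [List.getD_eq_getElem?_getD, hv]
      rfl
    have ht : t = array.drop (k + 1) := by
      have hdd : array.drop (k + 1) = (array.drop k).drop 1 := by
        rw [List.drop_drop]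
      rw [hdd, ← h]
      rfl
    simp only [List.length_cons, List.range'_succ, List.foldl_cons, pvFlags, pvLoopA]
    rw [← ih (k + 1) _ ht]
    simp only [hget]

-- A's port is the map of pvPartA over the bitmask range
theorem pv_A_eq (array : List Int) :
    CargoPartition array = (List.range (2 ^ (array.length - 1))).map (pvPartA array) := by
  unfold CargoPartition
  rw [pv_foldl_snoc_map]
  simp only [List.nil_append]
  apply List.map_congr_left
  intro m _
  have hb := pv_inner_bridge array m array 0 ([], []) (by simp)
  rw [List.range_eq_range']
  unfold pvPartA
  rw [← hb]

theorem pv_alt_cons (a0 : Int) (rest : List Int) :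
    CargoPartition_alt (a0 :: rest) = rest.foldl pvStep [[[a0]]] := by
  unfold CargoPartition_alt
  rw [PySem.List.slice_from_one]
  rfl

-- the main induction: binary-counter enumeration = incremental doubling
theorem pv_main (zs : List Int) : ∀ (a : Int),
    (List.range (2 ^ ((a :: zs).length - 1))).map (pvPartA (a :: zs))
      = zs.foldl pvStep [[[a]]] := by
  induction zs using List.reverseRecOn with
  | nil =>
    intro a
    have h1 : pvPartA [a] 0 = [[a]] := by
      have := pvPartA_concat [] a 0
      simpa [pvQ, pvBase, pvLoopA] using this
    simp [h1]
  | append_singleton t y ih =>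
    intro a
    obtain hq | ⟨q, z, hqz⟩ := (a :: t).eq_nil_or_concat
    · exact absurd hq (by simp)
    rw [List.concat_eq_append] at hqz
    have hlen : q.length = t.length := by
      have := congrArg List.length hqz
      simp at this
      omega
    have hsplit : a :: (t ++ [y]) = (a :: t) ++ [y] := by simp
    rw [hsplit, show ((a :: t) ++ [y]).length - 1 = t.length + 1 by simp, pow_succ,
      mul_two, List.range_add, List.map_append, List.map_map]
    have e1 : (List.range (2 ^ t.length)).map (pvPartA ((a :: t) ++ [y]))
        = ((List.range (2 ^ t.length)).map (pvPartA (a :: t))).map (pvExt y) := by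
      rw [List.map_map]
      apply List.map_congr_left
      intro m hm
      rw [List.mem_range] at hm
      have hs := pv_step_lo q z y m (by rw [hlen]; exact hm)
      rw [← hqz] at hs
      simpa using hs
    have e2 : (List.range (2 ^ t.length)).map
          (pvPartA ((a :: t) ++ [y]) ∘ (2 ^ t.length + ·))
        = ((List.range (2 ^ t.length)).map (pvPartA (a :: t))).map
            (fun p => p ++ [[y]]) := by
      rw [List.map_map]
      apply List.map_congr_left
      intro m hm
      rw [List.mem_range] at hm
      have hs := pv_step_hi q z y m (by rw [hlen]; exact hm)
      rw [← hqz, hlen] at hs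
      simpa using hs
    rw [e1, e2, List.foldl_append, List.foldl_cons, List.foldl_nil, ← ih a]
    rw [show ((a :: t).length - 1) = t.length by simp]
    rfl

-- ===== VERDICT (by name: the statement is the Claim_ definition above) =====
theorem CargoPartition_spec : Claim_equal_CargoPartition := by
  intro array _ hpre
  unfold Spec_CargoPartition
  cases array with
  | nil => exact absurd rfl hpre
  | cons a rest =>
    rw [pv_A_eq, pv_alt_cons]
    exact pv_main rest a
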